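-- pv_equiv track=rewrite | github.com/ZenithAtkinson/Algorithms-BIO-CS- | Bio364/Chapter_6/9.13.Multiple_Pattern_Matching_Problem.py | find_right_bound
-- ===== SOURCE A (Python) =====
-- from typing import List, Dict, Iterable, Tuple
--
-- def find_right_bound(text: str, pattern: str, suffix_array: List[int]) -> int:
--     left = 0
--     right = len(suffix_array)
--     while left < right:
--         mid = (left + right) // 2
--         suffix = text[suffix_array[mid]:]
--         if suffix.startswith(pattern) or suffix < pattern:
--             left = mid + 1
--         else:
--             right = mid
--     return left
-- ===== SOURCE B (Python) =====
-- def find_right_bound(text, pattern, suffix_array):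
--     def go(base, seg):
--         if not seg:
--             return base
--         m = len(seg) // 2
--         suffix = text[seg[m]:]
--         if suffix.startswith(pattern) or suffix < pattern:
--             return go(base + m + 1, seg[m + 1:])
--         return go(base, seg[:m])
--     return go(0, list(suffix_array))
-- ===== Notes on version B (the rewrite author's own statement) =====
-- stated objective: alternative
-- what changed: the two-index while loop is replaced by a divide-and-conquer recursion that splits the suffix-array list itself with slicing (seg[:m] / seg[m+1:]) and carries a base offset, with no index-pair state
import Mathlib
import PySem

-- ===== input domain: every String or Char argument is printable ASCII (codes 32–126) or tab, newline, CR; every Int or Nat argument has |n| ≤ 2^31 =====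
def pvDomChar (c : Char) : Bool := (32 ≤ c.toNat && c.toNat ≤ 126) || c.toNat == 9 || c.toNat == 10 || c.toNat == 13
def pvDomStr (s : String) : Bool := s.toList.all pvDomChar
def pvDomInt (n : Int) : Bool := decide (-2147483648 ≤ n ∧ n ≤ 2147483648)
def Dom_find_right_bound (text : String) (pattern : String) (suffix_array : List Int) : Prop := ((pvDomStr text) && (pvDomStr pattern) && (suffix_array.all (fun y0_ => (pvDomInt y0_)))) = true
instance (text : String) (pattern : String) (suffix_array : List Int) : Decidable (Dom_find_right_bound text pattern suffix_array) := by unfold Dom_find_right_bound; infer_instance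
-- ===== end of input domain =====

-- B replaces A's two-index while loop by a recursion that splits the suffix-array list
-- itself (take/drop) and carries a base offset; same comparisons, no asymptotic change.


-- 'suffix.startswith(pattern) or suffix < pattern', on suffix = text[idx:]
-- (the identical comparison expression appears verbatim in both Pythons)
def frbCond (text pattern : String) (idx : Int) : Bool :=
  let suffix := PySem.Str.slice text (some idx) none
  PySem.Str.startswith suffix pattern || decide (suffix < pattern)

-- ===== PORT A =====

-- the while loop of A, with its mutable left/right as parameters
def frbLoopA (text pattern : String) (suffix_array : List Int) (left right : Nat) : Nat :=
  if _h : left < right then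
    -- mid = (left + right) // 2; suffix_array[mid] is always in range here, so getD is exact
    if frbCond text pattern (suffix_array.getD ((left + right) / 2) 0) then
      frbLoopA text pattern suffix_array ((left + right) / 2 + 1) right
    else
      frbLoopA text pattern suffix_array left ((left + right) / 2)
  else left
termination_by right - left
decreasing_by all_goals omega

def find_right_bound (text : String) (pattern : String) (suffix_array : List Int) : Int :=
  (frbLoopA text pattern suffix_array 0 suffix_array.length : Int)

-- ===== PORT B =====
-- B's go(base, seg): recursion on the list segment itself
def frbGo (text pattern : String) (base : Nat) (seg : List Int) : Nat :=
  if _h : seg = [] then base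
  else
    -- m = len(seg) // 2; seg[m] is always in range, so getD is exact
    if frbCond text pattern (seg.getD (seg.length / 2) 0) then
      frbGo text pattern (base + seg.length / 2 + 1) (seg.drop (seg.length / 2 + 1))
    else
      frbGo text pattern base (seg.take (seg.length / 2))
termination_by seg.length
decreasing_by
  · simp only [List.length_drop]
    have : seg.length ≠ 0 := fun h => _h (List.eq_nil_of_length_eq_zero h)
    omega
  · simp only [List.length_take]
    have : seg.length ≠ 0 := fun h => _h (List.eq_nil_of_length_eq_zero h)
    omega

def find_right_bound_alt (text : String) (pattern : String) (suffix_array : List Int) : Int :=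
  (frbGo text pattern 0 suffix_array : Int)

-- ===== PRECONDITION & SPEC =====
def Spec_find_right_bound (text : String) (pattern : String) (suffix_array : List Int) (out : Int) : Prop := out = find_right_bound_alt text pattern suffix_array
instance (text : String) (pattern : String) (suffix_array : List Int) (out : Int) : Decidable (Spec_find_right_bound text pattern suffix_array out) := by unfold Spec_find_right_bound; infer_instance

-- ===== CLAIM (what is proved, stated in full; the proofs are below) =====
def Claim_equal_find_right_bound : Prop := ∀ (text : String) (pattern : String) (suffix_array : List Int), Dom_find_right_bound text pattern suffix_array → Spec_find_right_bound text pattern suffix_array (find_right_bound text pattern suffix_array)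

-- ===== LEMMAS AND PROOFS =====

-- loop ↔ recursion on segments: A's loop on [left, right) equals B's go on base = left
-- and seg = suffix_array[left:right], by induction on the span right - left (as fuel n).
theorem frbLoopA_eq_frbGo (text pattern : String) (sa : List Int) :
    ∀ (n left right : Nat), right - left ≤ n → right ≤ sa.length →
      frbLoopA text pattern sa left right =
        frbGo text pattern left ((sa.drop left).take (right - left)) := by
  intro n
  induction n with
  | zero =>
    intro left right hspan hlen
    have h0 : right - left = 0 := by omega
    rw [frbLoopA, frbGo]
    simp [h0, show ¬ left < right by omega]
  | succ n ih =>
    intro left right hspan hlen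
    by_cases hlr : left < right
    · have hseglen : ((sa.drop left).take (right - left)).length = right - left := by
        simp; omega
      have hsegne : (sa.drop left).take (right - left) ≠ [] := by
        intro h
        rw [h] at hseglen; simp at hseglen; omega
      rw [frbLoopA, frbGo]
      simp only [dif_pos hlr, dif_neg hsegne]
      rw [hseglen]
      -- the probed elements agree
      have helem : ((sa.drop left).take (right - left)).getD ((right - left) / 2) 0
          = sa.getD ((left + right) / 2) 0 := by
        have hmlt : (right - left) / 2 < ((sa.drop left).take (right - left)).length := by
          rw [hseglen]; omega
        rw [List.getD_eq_getElem _ _ hmlt,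
            List.getD_eq_getElem _ _ (show (left + right) / 2 < sa.length by omega)]
        simp only [List.getElem_take, List.getElem_drop]
        congr 1
        omega
      rw [helem]
      unfold frbCond
      by_cases hc : (PySem.Str.startswith (PySem.Str.slice text (some (sa.getD ((left + right) / 2) 0)) none) pattern
            || decide ((PySem.Str.slice text (some (sa.getD ((left + right) / 2) 0)) none) < pattern)) = true
      · rw [if_pos hc, if_pos hc,
            ih ((left + right) / 2 + 1) right (by omega) hlen]
        simp only [List.drop_take, List.drop_drop]
        rw [show left + (right - left) / 2 + 1 = (left + right) / 2 + 1 by omega,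
            show left + ((right - left) / 2 + 1) = (left + right) / 2 + 1 by omega,
            show right - left - ((right - left) / 2 + 1) = right - ((left + right) / 2 + 1) by omega]
      · rw [if_neg hc, if_neg hc,
            ih left ((left + right) / 2) (by omega) (by omega), List.take_take]
        rw [show min ((right - left) / 2) (right - left) = (left + right) / 2 - left by omega]
    · have h0 : right - left = 0 := by omega
      rw [frbLoopA, frbGo]
      simp [h0, hlr]

-- ===== VERDICT (by name: the statement is the Claim_ definition above) =====
theorem find_right_bound_spec : Claim_equal_find_right_bound := by
  intro text pattern sa _
  unfold Spec_find_right_bound find_right_bound find_right_bound_alt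
  rw [frbLoopA_eq_frbGo text pattern sa sa.length 0 sa.length (by omega) le_rfl]
  simp
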